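-- pv_equiv track=rewrite | github.com/ziggle-dev/Deimos-Wizard101 | src/quest_db.py | classify_entity_by_behavior
-- ===== SOURCE A (Python) =====
-- def classify_entity_by_behavior(behaviors: str, has_display_name: bool) -> str:
--     """Classify entity type based on its behaviors - UNIVERSAL SOLUTION.
--
--     Returns: 'npc', 'mob', 'reagent', 'other'
--     """
--     if not behaviors:
--         # No behaviors - likely ambient/positional objects or reagents
--         return 'reagent' if has_display_name else 'other'
--
--     behavior_list = behaviors.split(',')
--
--     # NPCs have NPCBehavior without being enemies
--     if 'NPCBehavior' in behavior_list:
--         # Check if it's actually a mob (has NPCBehavior but is_enemy flag)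
--         # This is checked in sprinty_client.get_mobs() method
--         # For now, treat as NPC - mobs will be reclassified if needed
--         return 'npc'
--
--     # Collectibles/Reagents typically have these behaviors
--     if any(b in behavior_list for b in ['CollectBehavior', 'ReagentBehavior', 'PickupBehavior']):
--         return 'reagent'
--
--     # Quest objects
--     if 'QuestBehavior' in behavior_list or 'QuestObjectBehavior' in behavior_list:
--         return 'quest_object'
--
--     # Wisps
--     if 'WispBehavior' in behavior_list:
--         return 'wisp'
--
--     # Duel circles/sigils
--     if 'DuelCircleBehavior' in behavior_list or 'SigilBehavior' in behavior_list:
--         return 'duel_circle'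
--
--     # Has display name but no specific behavior - likely a reagent
--     if has_display_name:
--         return 'reagent'
--
--     # Default
--     return 'other'
-- ===== SOURCE B (Python) =====
-- # Single-pass min-priority classification: map each behavior to a numeric rank,
-- # track the minimum rank seen, then translate the best rank to its label.
-- _RANK = {
--     'NPCBehavior': 0,
--     'CollectBehavior': 1, 'ReagentBehavior': 1, 'PickupBehavior': 1,
--     'QuestBehavior': 2, 'QuestObjectBehavior': 2,
--     'WispBehavior': 3,
--     'DuelCircleBehavior': 4, 'SigilBehavior': 4,
-- }
-- _LABELS = ['npc', 'reagent', 'quest_object', 'wisp', 'duel_circle']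
--
--
-- def classify_entity_by_behavior(behaviors: str, has_display_name: bool) -> str:
--     """Classify entity type based on its behaviors (min-priority scan)."""
--     if not behaviors:
--         return 'reagent' if has_display_name else 'other'
--     best = 5
--     for b in behaviors.split(','):
--         r = _RANK.get(b, 5)
--         if r < best:
--             best = r
--     if best < 5:
--         return _LABELS[best]
--     return 'reagent' if has_display_name else 'other'
-- ===== Notes on version B (the rewrite author's own statement) =====
-- stated objective: alternative
-- what changed: Replaced A's ordered chain of membership tests (each rescanning the behavior list) by a single pass over the behaviors that folds a minimum priority rank via a behavior-to-rank dict, then maps the best rank to its label.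
import Mathlib
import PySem

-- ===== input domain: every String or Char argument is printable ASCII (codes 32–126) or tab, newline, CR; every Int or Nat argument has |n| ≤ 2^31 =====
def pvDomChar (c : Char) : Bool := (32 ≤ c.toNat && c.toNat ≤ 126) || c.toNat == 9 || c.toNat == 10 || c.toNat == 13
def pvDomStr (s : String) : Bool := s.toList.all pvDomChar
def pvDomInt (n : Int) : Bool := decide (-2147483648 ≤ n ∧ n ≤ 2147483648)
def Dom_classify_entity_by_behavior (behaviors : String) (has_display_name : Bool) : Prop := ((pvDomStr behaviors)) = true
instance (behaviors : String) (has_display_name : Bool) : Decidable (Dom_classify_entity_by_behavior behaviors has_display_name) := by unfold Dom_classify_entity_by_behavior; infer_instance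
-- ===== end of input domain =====

-- B replaces A's chain of membership tests (each rescanning the split list) by one pass
-- that folds the minimum priority rank of the behaviors, then maps that rank to its label
-- (objective: alternative single-pass algorithm).

-- ===== PORT A =====
def classify_entity_by_behavior (behaviors : String) (has_display_name : Bool) : String :=
  if behaviors.toList = [] then (if has_display_name then "reagent" else "other")
  else
    -- sep "," is nonempty, so split? is always `some` here (exact)
    let behavior_list : List String := (PySem.Str.split? behaviors ",").getD []
    if behavior_list.contains "NPCBehavior" then "npc"
    else if (["CollectBehavior", "ReagentBehavior", "PickupBehavior"].any
        fun b => behavior_list.contains b) then "reagent"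
    else if behavior_list.contains "QuestBehavior" || behavior_list.contains "QuestObjectBehavior" then "quest_object"
    else if behavior_list.contains "WispBehavior" then "wisp"
    else if behavior_list.contains "DuelCircleBehavior" || behavior_list.contains "SigilBehavior" then "duel_circle"
    else if has_display_name then "reagent"
    else "other"

-- ===== PORT B =====
-- _RANK dict of Source B
def pvRank : PySem.Dict String Int := PySem.Dict.ofList
  [("NPCBehavior", 0),
   ("CollectBehavior", 1), ("ReagentBehavior", 1), ("PickupBehavior", 1),
   ("QuestBehavior", 2), ("QuestObjectBehavior", 2),
   ("WispBehavior", 3),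
   ("DuelCircleBehavior", 4), ("SigilBehavior", 4)]

-- _LABELS list of Source B
def pvLabels : List String := ["npc", "reagent", "quest_object", "wisp", "duel_circle"]

-- r = _RANK.get(b, 5)
def pvRankOf (b : String) : Int := pvRank.getD b 5

-- the loop body: 'r = _RANK.get(b, 5); if r < best: best = r'
def pvStep (best : Int) (b : String) : Int :=
  if pvRankOf b < best then pvRankOf b else best

def classify_entity_by_behavior_alt (behaviors : String) (has_display_name : Bool) : String :=
  if behaviors.toList = [] then (if has_display_name then "reagent" else "other")
  else
    let L : List String := (PySem.Str.split? behaviors ",").getD []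
    let best : Int := L.foldl pvStep 5
    if best < 5 then
      -- _LABELS[best]: exact here, since the guard gives 0 ≤ best < 5, so pyGet? is `some`
      (PySem.List.pyGet? pvLabels best).getD ""
    else if has_display_name then "reagent" else "other"

-- ===== PRECONDITION & SPEC =====
def Spec_classify_entity_by_behavior (behaviors : String) (has_display_name : Bool) (out : String) : Prop := out = classify_entity_by_behavior_alt behaviors has_display_name
instance (behaviors : String) (has_display_name : Bool) (out : String) : Decidable (Spec_classify_entity_by_behavior behaviors has_display_name out) := by unfold Spec_classify_entity_by_behavior; infer_instance

-- ===== CLAIM (what is proved, stated in full; the proofs are below) =====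
def Claim_equal_classify_entity_by_behavior : Prop := ∀ (behaviors : String) (has_display_name : Bool), Dom_classify_entity_by_behavior behaviors has_display_name → Spec_classify_entity_by_behavior behaviors has_display_name (classify_entity_by_behavior behaviors has_display_name)

-- ===== LEMMAS AND PROOFS =====

theorem rank_def (b : String) : pvRankOf b =
    if b = "NPCBehavior" then 0
    else if b = "CollectBehavior" then 1
    else if b = "ReagentBehavior" then 1
    else if b = "PickupBehavior" then 1
    else if b = "QuestBehavior" then 2
    else if b = "QuestObjectBehavior" then 2
    else if b = "WispBehavior" then 3
    else if b = "DuelCircleBehavior" then 4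
    else if b = "SigilBehavior" then 4
    else 5 := by
  simp only [pvRankOf, pvRank, PySem.Dict.ofList, PySem.Dict.update, List.foldl,
    PySem.Dict.getD_insert, PySem.Dict.getD_empty]
  split_ifs <;> simp_all

theorem rank_nonneg (b : String) : 0 ≤ pvRankOf b := by
  rw [rank_def]; split_ifs <;> norm_num

theorem foldl_step_le (L : List String) (acc k : Int) :
    L.foldl pvStep acc ≤ k ↔ acc ≤ k ∨ ∃ b ∈ L, pvRankOf b ≤ k := by
  induction L generalizing acc with
  | nil => simp
  | cons b L ih =>
    simp only [List.foldl_cons, ih, List.mem_cons]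
    constructor
    · rintro (h | ⟨c, hc, hrk⟩)
      · simp only [pvStep] at h
        split_ifs at h with hlt
        · exact Or.inr ⟨b, Or.inl rfl, h⟩
        · exact Or.inl h
      · exact Or.inr ⟨c, Or.inr hc, hrk⟩
    · rintro (h | ⟨c, (rfl | hc), hrk⟩)
      · refine Or.inl ?_; simp only [pvStep]; split_ifs with hlt <;> omega
      · refine Or.inl ?_; simp only [pvStep]; split_ifs with hlt <;> omega
      · exact Or.inr ⟨c, hc, hrk⟩

theorem foldl_step_ge (L : List String) (acc k : Int) :
    k ≤ L.foldl pvStep acc ↔ k ≤ acc ∧ ∀ b ∈ L, k ≤ pvRankOf b := by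
  induction L generalizing acc with
  | nil => simp
  | cons b L ih =>
    simp only [List.foldl_cons, ih, List.mem_cons]
    constructor
    · rintro ⟨h, hall⟩
      simp only [pvStep] at h
      split_ifs at h with hlt
      · exact ⟨by omega, fun c hc => hc.elim (fun e => e ▸ h) (hall c)⟩
      · exact ⟨h, fun c hc => hc.elim (fun e => e ▸ (by omega)) (hall c)⟩
    · rintro ⟨h, hall⟩
      refine ⟨?_, fun c hc => hall c (Or.inr hc)⟩
      have hb := hall b (Or.inl rfl)
      simp only [pvStep]; split_ifs <;> omega

theorem mem_of_contains {L : List String} {s : String} (h : L.contains s = true) : s ∈ L :=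
  List.contains_iff_mem.mp h

theorem not_mem_of_contains_ne {L : List String} {s : String}
    (h : ¬ L.contains s = true) : s ∉ L := fun m => h (List.contains_iff_mem.mpr m)

set_option maxHeartbeats 800000 in
theorem best_val (L : List String) :
    L.foldl pvStep 5 =
      (if L.contains "NPCBehavior" then 0
       else if L.contains "CollectBehavior" || L.contains "ReagentBehavior" || L.contains "PickupBehavior" then 1
       else if L.contains "QuestBehavior" || L.contains "QuestObjectBehavior" then 2
       else if L.contains "WispBehavior" then 3
       else if L.contains "DuelCircleBehavior" || L.contains "SigilBehavior" then 4
       else 5) := by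
  split_ifs with h1 h2 h3 h4 h5
  · refine le_antisymm ((foldl_step_le L 5 0).mpr (Or.inr ⟨_, mem_of_contains h1, by decide⟩))
      ((foldl_step_ge L 5 0).mpr ⟨by norm_num, fun b _ => rank_nonneg b⟩)
  · refine le_antisymm ?_ ?_
    · rcases (by simpa [or_assoc, List.contains_iff_mem] using h2 : "CollectBehavior" ∈ L ∨ "ReagentBehavior" ∈ L ∨ "PickupBehavior" ∈ L) with h | h | h <;>
        exact (foldl_step_le L 5 1).mpr (Or.inr ⟨_, h, by decide⟩)
    · refine (foldl_step_ge L 5 1).mpr ⟨by norm_num, fun b hb => ?_⟩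
      rw [rank_def]; split_ifs with e <;> try omega
      exact absurd (e ▸ hb) (not_mem_of_contains_ne h1)
  · refine le_antisymm ?_ ?_
    · rcases (by simpa [List.contains_iff_mem] using h3 : "QuestBehavior" ∈ L ∨ "QuestObjectBehavior" ∈ L) with h | h <;>
        exact (foldl_step_le L 5 2).mpr (Or.inr ⟨_, h, by decide⟩)
    · refine (foldl_step_ge L 5 2).mpr ⟨by norm_num, fun b hb => ?_⟩
      simp only [Bool.or_eq_true, not_or] at h2
      rw [rank_def]; split_ifs with e1 e2 e3 e4 <;> try omega
      · exact absurd (e1 ▸ hb) (not_mem_of_contains_ne h1)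
      · exact absurd (e2 ▸ hb) (not_mem_of_contains_ne h2.1.1)
      · exact absurd (e3 ▸ hb) (not_mem_of_contains_ne h2.1.2)
      · exact absurd (e4 ▸ hb) (not_mem_of_contains_ne h2.2)
  · refine le_antisymm ((foldl_step_le L 5 3).mpr (Or.inr ⟨_, mem_of_contains h4, by decide⟩)) ?_
    refine (foldl_step_ge L 5 3).mpr ⟨by norm_num, fun b hb => ?_⟩
    simp only [Bool.or_eq_true, not_or] at h2 h3
    rw [rank_def]; split_ifs with e1 e2 e3 e4 e5 e6 <;> try omega
    · exact absurd (e1 ▸ hb) (not_mem_of_contains_ne h1)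
    · exact absurd (e2 ▸ hb) (not_mem_of_contains_ne h2.1.1)
    · exact absurd (e3 ▸ hb) (not_mem_of_contains_ne h2.1.2)
    · exact absurd (e4 ▸ hb) (not_mem_of_contains_ne h2.2)
    · exact absurd (e5 ▸ hb) (not_mem_of_contains_ne h3.1)
    · exact absurd (e6 ▸ hb) (not_mem_of_contains_ne h3.2)
  · refine le_antisymm ?_ ?_
    · rcases (by simpa [List.contains_iff_mem] using h5 : "DuelCircleBehavior" ∈ L ∨ "SigilBehavior" ∈ L) with h | h <;>
        exact (foldl_step_le L 5 4).mpr (Or.inr ⟨_, h, by decide⟩)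
    · refine (foldl_step_ge L 5 4).mpr ⟨by norm_num, fun b hb => ?_⟩
      simp only [Bool.or_eq_true, not_or] at h2 h3
      rw [rank_def]; split_ifs with e1 e2 e3 e4 e5 e6 e7 <;> try omega
      · exact absurd (e1 ▸ hb) (not_mem_of_contains_ne h1)
      · exact absurd (e2 ▸ hb) (not_mem_of_contains_ne h2.1.1)
      · exact absurd (e3 ▸ hb) (not_mem_of_contains_ne h2.1.2)
      · exact absurd (e4 ▸ hb) (not_mem_of_contains_ne h2.2)
      · exact absurd (e5 ▸ hb) (not_mem_of_contains_ne h3.1)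
      · exact absurd (e6 ▸ hb) (not_mem_of_contains_ne h3.2)
      · exact absurd (e7 ▸ hb) (not_mem_of_contains_ne h4)
  · refine le_antisymm ?_ ?_
    · refine (foldl_step_le L 5 5).mpr (Or.inl (by norm_num))
    · refine (foldl_step_ge L 5 5).mpr ⟨by norm_num, fun b hb => ?_⟩
      simp only [Bool.or_eq_true, not_or] at h2 h3 h5
      rw [rank_def]; split_ifs with e1 e2 e3 e4 e5 e6 e7 e8 e9 <;> try omega
      · exact absurd (e1 ▸ hb) (not_mem_of_contains_ne h1)
      · exact absurd (e2 ▸ hb) (not_mem_of_contains_ne h2.1.1)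
      · exact absurd (e3 ▸ hb) (not_mem_of_contains_ne h2.1.2)
      · exact absurd (e4 ▸ hb) (not_mem_of_contains_ne h2.2)
      · exact absurd (e5 ▸ hb) (not_mem_of_contains_ne h3.1)
      · exact absurd (e6 ▸ hb) (not_mem_of_contains_ne h3.2)
      · exact absurd (e7 ▸ hb) (not_mem_of_contains_ne h4)
      · exact absurd (e8 ▸ hb) (not_mem_of_contains_ne h5.1)
      · exact absurd (e9 ▸ hb) (not_mem_of_contains_ne h5.2)

theorem classify_entity_by_behavior_spec : Claim_equal_classify_entity_by_behavior := by
  intro behaviors hdn _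
  unfold Spec_classify_entity_by_behavior classify_entity_by_behavior classify_entity_by_behavior_alt
  by_cases h : behaviors.toList = []
  · simp [h]
  · simp only [h, if_false]
    rw [best_val]
    split_ifs <;> simp_all [PySem.List.pyGet?, PySem.List.pyIdx?] <;> tauto
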